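-- pv_equiv track=rewrite | github.com/Nima-Shadman/Metadata_Extraction | metadata_classification/features_for_meta_classification.py | cut_blocks
-- ===== SOURCE A (Python) =====
-- def cut_blocks(two_d_list, index):
--     # Flatten the 2D list into a 1D list
--     flattened_list = [element for sublist in two_d_list for element in sublist]
--
--     # Get only the elements up to the given index
--     truncated_flattened_list = flattened_list[:index]
--
--     # Reconstruct the 2D list with the same structure up to the index
--     new_2d_list = []
--     current_index = 0
--
--     for sublist in two_d_list:
--         new_sublist = []
--         for element in sublist:
--             if current_index < index:
--                 new_sublist.append(element)
--                 current_index += 1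
--             else:
--                 break
--         if new_sublist:
--             new_2d_list.append(new_sublist)
--         if current_index >= index:
--             break
--
--     return new_2d_list
-- ===== SOURCE B (Python) =====
-- def cut_blocks(two_d_list, index):
--     result = []
--     remaining = index
--     for sublist in two_d_list:
--         if remaining <= 0:
--             break
--         piece = sublist[:remaining]
--         if piece:
--             result.append(piece)
--         remaining -= len(piece)
--     return result
-- ===== Notes on version B (the rewrite author's own statement) =====
-- stated objective: simpler
-- what changed: Drops A's dead flatten/truncate pass and replaces the per-element counter loop with a per-sublist slice driven by a single 'remaining' counter.
import Mathlib
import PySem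

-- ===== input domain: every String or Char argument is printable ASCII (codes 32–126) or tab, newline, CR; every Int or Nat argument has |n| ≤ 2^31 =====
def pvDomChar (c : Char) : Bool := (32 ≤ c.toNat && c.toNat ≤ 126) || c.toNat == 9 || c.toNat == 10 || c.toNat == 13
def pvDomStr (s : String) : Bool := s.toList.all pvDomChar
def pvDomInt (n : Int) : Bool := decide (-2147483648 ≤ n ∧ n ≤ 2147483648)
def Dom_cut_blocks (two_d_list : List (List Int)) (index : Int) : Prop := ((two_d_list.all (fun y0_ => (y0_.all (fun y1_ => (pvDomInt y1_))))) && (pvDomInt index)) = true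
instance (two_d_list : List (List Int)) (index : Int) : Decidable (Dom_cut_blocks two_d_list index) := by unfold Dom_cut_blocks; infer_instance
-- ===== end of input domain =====

-- B simplifies A: it drops A's dead flatten/truncate pass and replaces the per-element
-- counter loop with one per-sublist slice driven by a single remaining counter.
-- ===== PORT A =====
-- inner per-element loop of A: consumes sublist while current_index < index
def pvCutInner (sub : List Int) (ci : Int) (index : Int) : List Int × Int :=
  match sub with
  | [] => ([], ci)
  | e :: rest =>
    if ci < index then
      let r := pvCutInner rest (ci + 1) index
      (e :: r.1, r.2)
    else ([], ci)

-- outer loop of A over sublists, with the two breaks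
def pvCutOuter (l : List (List Int)) (ci : Int) (index : Int) : List (List Int) :=
  match l with
  | [] => []
  | sub :: rest =>
    let r := pvCutInner sub ci index
    let acc := if r.1 ≠ [] then [r.1] else []
    if r.2 ≥ index then acc else acc ++ pvCutOuter rest r.2 index

def cut_blocks (two_d_list : List (List Int)) (index : Int) : List (List Int) :=
  -- A's first two lines (flatten + truncate) are computed and discarded, as in the Python
  let flattened_list := two_d_list.flatten
  let _truncated := PySem.List.slice flattened_list none (some index)
  pvCutOuter two_d_list 0 index

-- ===== PORT B =====
-- B's loop: break when remaining ≤ 0, else slice sublist[:remaining]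
-- (remaining > 0 here, so the Python slice is exactly List.take remaining.toNat)
def cut_blocks_alt (two_d_list : List (List Int)) (index : Int) : List (List Int) :=
  match two_d_list with
  | [] => []
  | sub :: rest =>
    if index ≤ 0 then []
    else
      let piece := sub.take index.toNat
      let tail := cut_blocks_alt rest (index - piece.length)
      if piece ≠ [] then piece :: tail else tail

-- ===== PRECONDITION & SPEC =====
def Spec_cut_blocks (two_d_list : List (List Int)) (index : Int) (out : List (List Int)) : Prop := out = cut_blocks_alt two_d_list index
instance (two_d_list : List (List Int)) (index : Int) (out : List (List Int)) : Decidable (Spec_cut_blocks two_d_list index out) := by unfold Spec_cut_blocks; infer_instance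

-- ===== CLAIM (what is proved, stated in full; the proofs are below) =====
def Claim_equal_cut_blocks : Prop := ∀ (two_d_list : List (List Int)) (index : Int), Dom_cut_blocks two_d_list index → Spec_cut_blocks two_d_list index (cut_blocks two_d_list index)

-- ===== LEMMAS AND PROOFS =====

theorem pvCutInner_eq (sub : List Int) (ci index : Int) :
    pvCutInner sub ci index =
      (sub.take (index - ci).toNat, ci + (sub.take (index - ci).toNat).length) := by
  induction sub generalizing ci with
  | nil => simp [pvCutInner]
  | cons e rest ih =>
    by_cases h : ci < index
    · have ht : (index - ci).toNat = (index - (ci + 1)).toNat + 1 := by omega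
      simp [pvCutInner, h, ih (ci + 1), ht, List.take_succ_cons]
      omega
    · have ht : (index - ci).toNat = 0 := by omega
      simp [pvCutInner, h, ht]

theorem cut_blocks_alt_nonpos (l : List (List Int)) (r : Int) (h : r ≤ 0) :
    cut_blocks_alt l r = [] := by
  cases l with
  | nil => simp [cut_blocks_alt]
  | cons s rest => simp [cut_blocks_alt, h]

theorem pvCutOuter_eq_alt (l : List (List Int)) (ci index : Int) :
    pvCutOuter l ci index = cut_blocks_alt l (index - ci) := by
  induction l generalizing ci with
  | nil => simp [pvCutOuter, cut_blocks_alt]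
  | cons sub rest ih =>
    simp only [pvCutOuter, pvCutInner_eq]
    by_cases h : index - ci ≤ 0
    · have ht : (index - ci).toNat = 0 := by omega
      have h2 : ci ≥ index := by omega
      simp [cut_blocks_alt, ht, h, h2]
    · set piece := sub.take (index - ci).toNat with hp
      by_cases hb : ci + (piece.length : Int) ≥ index
      · -- A breaks here; B's recursive call has remaining ≤ 0
        have hz : index - (ci + (piece.length : Int)) ≤ 0 := by omega
        simp only [cut_blocks_alt, if_neg (by omega : ¬ index - ci ≤ 0), ← hp]
        rw [cut_blocks_alt_nonpos rest _ (by omega : index - ci - (piece.length : Int) ≤ 0)]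
        by_cases hne : piece = []
        · exfalso; rw [hne] at hb; simp at hb; omega
        · simp [hne, hb]
      · simp only [cut_blocks_alt, if_neg (by omega : ¬ index - ci ≤ 0), ← hp]
        rw [if_neg (by omega : ¬ ci + (piece.length : Int) ≥ index), ih,
          (by ring : index - (ci + (piece.length : Int)) = index - ci - (piece.length : Int))]
        by_cases hne : piece = [] <;> simp [hne]

-- ===== VERDICT (by name: the statement is the Claim_ definition above) =====
theorem cut_blocks_spec : Claim_equal_cut_blocks := by
  intro l index _
  unfold Spec_cut_blocks cut_blocks
  simpa using pvCutOuter_eq_alt l 0 index
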